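-- pv_equiv track=rewrite | github.com/sueszli/vector-database-benchmark | dataset/python-mutated/count_ip_addresses.py | count_ip_addresses
-- ===== SOURCE A (Python) =====
-- def count_ip_addresses(S, K):
--     if False:
--         i = 10
--         return i + 15
--     n = len(S)
--     if n == 0:
--         return 0
--     if n < K:
--         return 0
--     dp = [0] * (n + 1)
--     dp[0] = 1
--     for i in range(K):
--         for j in range(n, i, -1):
--             dp[j] = 0
--             for e in range(max(i, j - 3), j):
--                 if is_valid(S[e:j]):
--                     dp[j] += dp[e]
--     return dp[n]
--
-- def is_valid(S):
--     if False:
--         while True: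
--             i = 10
--     if len(S) > 1 and S[0] == '0':
--         return False
--     return int(S) <= 255
-- ===== SOURCE B (Python) =====
-- def count_ip_addresses(S, K):
--     n = len(S)
--     if n == 0 or K <= 0 or n < K:
--         return 0
--     memo = {}
--
--     def f(j, segs):
--         # ways to split S[:j] into exactly `segs` valid segments
--         if j == 0:
--             return 1 if segs == 0 else 0
--         if segs == 0:
--             return 0
--         key = (j, segs)
--         if key in memo:
--             return memo[key]
--         total = 0
--         for L in (1, 2, 3):
--             if L <= j and is_valid(S[j - L:j]):
--                 total += f(j - L, segs - 1)
--         memo[key] = total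
--         return total
--
--     return f(n, K)
--
--
-- def is_valid(S):
--     if len(S) > 1 and S[0] == '0':
--         return False
--     return int(S) <= 255
-- ===== Notes on version B (the rewrite author's own statement) =====
-- stated objective: alternative
-- what changed: Replaced A's in-place bottom-up DP array (K passes rewriting dp[j] backwards) by a top-down memoized recursion f(j, segs) = number of ways to split S[:j] into exactly segs valid segments, computed on demand from a dictionary of (j, segs) states.
import Mathlib
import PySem

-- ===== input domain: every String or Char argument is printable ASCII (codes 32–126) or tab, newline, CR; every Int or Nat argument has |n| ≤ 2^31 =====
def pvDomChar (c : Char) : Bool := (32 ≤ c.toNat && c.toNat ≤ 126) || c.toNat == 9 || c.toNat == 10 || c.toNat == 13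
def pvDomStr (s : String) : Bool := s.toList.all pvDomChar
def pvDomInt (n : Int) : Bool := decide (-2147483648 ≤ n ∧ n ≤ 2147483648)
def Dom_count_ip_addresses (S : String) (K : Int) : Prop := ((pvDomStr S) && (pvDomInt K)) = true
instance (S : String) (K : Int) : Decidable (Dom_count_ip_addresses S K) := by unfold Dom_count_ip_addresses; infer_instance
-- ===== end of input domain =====

-- B replaces A's in-place bottom-up DP array by a top-down memoized recursion on
-- (prefix length, segments); same O(K*n) cost, different decomposition (objective: alternative).

-- ===== PORT A =====
-- is_valid(S): in the `none` branch Python's int() raises ValueError; those inputs are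
-- excluded by Pre_count_ip_addresses, the port returns false there.
def pvIsValid (s : List Char) : Bool :=
  if 1 < s.length ∧ PySem.List.pyGet? s 0 = some '0' then false
  else match PySem.Int.ofChars? s with
       | some v => decide (v ≤ 255)
       | none => false

-- the three loop bodies of A, innermost first (e-loop body, j-loop body, i-loop body)
def pvStepE (cs : List Char) (j : Int) (dp : List Int) (e : Int) : List Int :=
  if pvIsValid (PySem.List.slice cs (some e) (some j))
  then PySem.List.pySetD dp j (PySem.List.pyGetD dp j 0 + PySem.List.pyGetD dp e 0)
  else dp

def pvStepJ (cs : List Char) (i : Int) (dp : List Int) (j : Int) : List Int :=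
  (PySem.List.pyRange (max i (j - 3)) j 1).foldl (pvStepE cs j) (PySem.List.pySetD dp j 0)

def pvStepI (cs : List Char) (n : Int) (dp : List Int) (i : Int) : List Int :=
  (PySem.List.pyRange n i (-1)).foldl (pvStepJ cs i) dp

def count_ip_addresses (S : String) (K : Int) : Int :=
  let cs := S.toList
  let n : Int := PySem.List.len cs
  if n = 0 then 0
  else if n < K then 0
  else
    let dp := PySem.List.pySetD (List.replicate (n.toNat + 1) (0 : Int)) 0 1
    PySem.List.pyGetD ((PySem.List.pyRange 0 K 1).foldl (pvStepI cs n) dp) n 0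

-- ===== PORT B =====
-- f(j, segs) of Source B; segs is a Nat fuel (f is only ever called with segs ≥ 0), the memo
-- dictionary is keyed by (j, segs) exactly as in Source B; the L-loop over (1,2,3) is unrolled.
def pvFB (cs : List Char) : Nat → Int → PySem.Dict (Int × Int) Int →
    Int × PySem.Dict (Int × Int) Int
  | 0, j, memo => if j = 0 then (1, memo) else (0, memo)
  | s + 1, j, memo =>
    if j = 0 then (0, memo)
    else
      match memo.get? (j, (s : Int) + 1) with
      | some v => (v, memo)
      | none =>
        let r1 := if 1 ≤ j ∧ pvIsValid (PySem.List.slice cs (some (j - 1)) (some j))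
                  then pvFB cs s (j - 1) memo else (0, memo)
        let r2 := if 2 ≤ j ∧ pvIsValid (PySem.List.slice cs (some (j - 2)) (some j))
                  then pvFB cs s (j - 2) r1.2 else (0, r1.2)
        let r3 := if 3 ≤ j ∧ pvIsValid (PySem.List.slice cs (some (j - 3)) (some j))
                  then pvFB cs s (j - 3) r2.2 else (0, r2.2)
        let total := r1.1 + r2.1 + r3.1
        (total, r3.2.insert (j, (s : Int) + 1) total)

def count_ip_addresses_alt (S : String) (K : Int) : Int :=
  let cs := S.toList
  let n : Int := PySem.List.len cs
  if n = 0 ∨ K ≤ 0 ∨ n < K then 0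
  else (pvFB cs K.toNat n PySem.Dict.empty).1

-- ===== PRECONDITION & SPEC =====
-- Pre_ excludes exactly the inputs where Python A raises ValueError: is_valid calls
-- int() on a non-digit one-character slice whenever the loops run (n ≥ 1, 1 ≤ K ≤ n)
-- and S contains a non-digit character.
def Pre_count_ip_addresses (S : String) (K : Int) : Prop :=
  K ≤ 0 ∨ (S.toList.length : Int) < K ∨ S.toList = [] ∨ S.toList.all Char.isDigit
instance (S : String) (K : Int) : Decidable (Pre_count_ip_addresses S K) := by
  unfold Pre_count_ip_addresses; infer_instance
def pvWitness_count_ip_addresses : String × Int := ("25525511135", 4)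

def Spec_count_ip_addresses (S : String) (K : Int) (out : Int) : Prop := out = count_ip_addresses_alt S K
instance (S : String) (K : Int) (out : Int) : Decidable (Spec_count_ip_addresses S K out) := by unfold Spec_count_ip_addresses; infer_instance

-- ===== CLAIM (what is proved, stated in full; the proofs are below) =====
def Claim_equal_count_ip_addresses : Prop := ∀ (S : String) (K : Int), Dom_count_ip_addresses S K → Pre_count_ip_addresses S K → Spec_count_ip_addresses S K (count_ip_addresses S K)

-- ===== LEMMAS AND PROOFS =====

-- reference function: pvW cs s j = number of ways to split cs[:j] into exactly s valid segments
def pvW (cs : List Char) : Nat → Int → Int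
  | 0, j => if j = 0 then 1 else 0
  | s + 1, j =>
    if j = 0 then 0
    else
      (if 1 ≤ j ∧ pvIsValid (PySem.List.slice cs (some (j - 1)) (some j))
       then pvW cs s (j - 1) else 0)
    + (if 2 ≤ j ∧ pvIsValid (PySem.List.slice cs (some (j - 2)) (some j))
       then pvW cs s (j - 2) else 0)
    + (if 3 ≤ j ∧ pvIsValid (PySem.List.slice cs (some (j - 3)) (some j))
       then pvW cs s (j - 3) else 0)

theorem pvW_lt (cs : List Char) : ∀ (s : Nat) (j : Int), j < s → pvW cs s j = 0 := by
  intro s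
  induction s with
  | zero => intro j h; simp [pvW]; omega
  | succ s ih =>
    intro j h
    by_cases hj : j = 0
    · simp [pvW, hj]
    · have h1 := ih (j - 1) (by omega)
      have h2 := ih (j - 2) (by omega)
      have h3 := ih (j - 3) (by omega)
      simp [pvW, hj, h1, h2, h3]

-- ===== B side: the memoized recursion computes pvW =====
def pvMemoOK (cs : List Char) (memo : PySem.Dict (Int × Int) Int) : Prop :=
  ∀ p v, memo.get? p = some v → v = pvW cs p.2.toNat p.1

theorem pvFB_eq (cs : List Char) : ∀ (s : Nat) (j : Int) (memo : PySem.Dict (Int × Int) Int),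
    pvMemoOK cs memo →
    (pvFB cs s j memo).1 = pvW cs s j ∧ pvMemoOK cs (pvFB cs s j memo).2 := by
  intro s
  induction s with
  | zero =>
    intro j memo hOK
    by_cases hj : j = 0 <;> simp [pvFB, pvW, hj, hOK]
  | succ s ih =>
    intro j memo hOK
    by_cases hj : j = 0
    · simp [pvFB, pvW, hj, hOK]
    · cases hmem : memo.get? (j, (s : Int) + 1) with
      | some v =>
        have hv := hOK _ _ hmem
        have ht : ((s : Int) + 1).toNat = s + 1 := by omega
        simp only [ht] at hv
        simp only [pvFB, hmem, if_neg hj]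
        exact ⟨hv, hOK⟩
      | none =>
        have hstep : ∀ (cond : Prop) [Decidable cond] (j' : Int) (m : PySem.Dict (Int × Int) Int),
            pvMemoOK cs m →
            ((if cond then pvFB cs s j' m else (0, m)).1 = (if cond then pvW cs s j' else 0)) ∧
              pvMemoOK cs (if cond then pvFB cs s j' m else (0, m)).2 := by
          intro cond _ j' m hm
          split
          · exact ⟨(ih j' m hm).1, (ih j' m hm).2⟩
          · exact ⟨rfl, hm⟩
        obtain ⟨e1, k1⟩ := hstep (1 ≤ j ∧ pvIsValid (PySem.List.slice cs (some (j - 1)) (some j)) = true) (j - 1) memo hOK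
        obtain ⟨e2, k2⟩ := hstep (2 ≤ j ∧ pvIsValid (PySem.List.slice cs (some (j - 2)) (some j)) = true) (j - 2) _ k1
        obtain ⟨e3, k3⟩ := hstep (3 ≤ j ∧ pvIsValid (PySem.List.slice cs (some (j - 3)) (some j)) = true) (j - 3) _ k2
        simp only [pvFB, hmem, if_neg hj]
        constructor
        · simp only [e1, e2, e3]
          simp [pvW, hj]
        · intro p v hget
          rw [PySem.Dict.get?_insert] at hget
          split at hget
          · rename_i hp
            subst hp
            have ht : ((s : Int) + 1).toNat = s + 1 := by omega
            simp only [ht]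
            cases hget
            simp only [e1, e2, e3]
            simp [pvW, hj]
          · exact k3 _ _ hget

-- ===== A side: the dp loops compute pvW =====

-- Int-index bridges for the list primitives
theorem pvGetD_toNat (xs : List Int) (i : Int) (h : 0 ≤ i) :
    PySem.List.pyGetD xs i 0 = xs.getD i.toNat 0 := by
  have h2 : i = ((i.toNat : Nat) : Int) := by omega
  rw [h2, PySem.List.pyGetD_natCast, Int.toNat_natCast]

theorem pvGetD_set_self (xs : List Int) (n : Nat) (v : Int) (h : n < xs.length) :
    (xs.set n v).getD n 0 = v := by
  simp [List.getD_eq_getElem?_getD, h]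

theorem pvGetD_set_ne (xs : List Int) (n m : Nat) (v : Int) (h : m ≠ n) :
    (xs.set n v).getD m 0 = xs.getD m 0 := by
  simp [List.getD_eq_getElem?_getD, Ne.symm h]

-- one e-step of the innermost loop only rewrites slot j
theorem pvStepE_set (cs : List Char) (j e v : Int) (dp : List Int)
    (h0e : 0 ≤ e) (hej : e < j) (hjlen : j.toNat < dp.length) :
    pvStepE cs j (dp.set j.toNat v) e =
      dp.set j.toNat
        (v + if pvIsValid (PySem.List.slice cs (some e) (some j)) then dp.getD e.toNat 0 else 0) := by
  have h0j : (0 : Int) ≤ j := by omega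
  have hne : e.toNat ≠ j.toNat := by omega
  by_cases hv : pvIsValid (PySem.List.slice cs (some e) (some j)) = true
  · simp only [pvStepE, hv, if_true]
    rw [PySem.List.pySetD_of_nonneg _ _ h0j, pvGetD_toNat _ _ h0j, pvGetD_toNat _ _ h0e,
        pvGetD_set_self _ _ _ (by simpa using hjlen), pvGetD_set_ne _ _ _ _ hne,
        List.set_set]
  · simp only [pvStepE, hv]
    simp

-- pvW one-step unfolding at a successor segment count
theorem pvW_succ (cs : List Char) (s : Nat) (j : Int) (hj : j ≠ 0) :
    pvW cs (s + 1) j =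
      (if 1 ≤ j ∧ pvIsValid (PySem.List.slice cs (some (j - 1)) (some j)) then pvW cs s (j - 1) else 0)
    + (if 2 ≤ j ∧ pvIsValid (PySem.List.slice cs (some (j - 2)) (some j)) then pvW cs s (j - 2) else 0)
    + (if 3 ≤ j ∧ pvIsValid (PySem.List.slice cs (some (j - 3)) (some j)) then pvW cs s (j - 3) else 0) := by
  rw [pvW, if_neg hj]

-- one j-step of the middle loop: the whole e-fold is a single write of pvW (i+1) j to slot j
theorem pvStepJ_eq (cs : List Char) (i j : Int) (dp : List Int)
    (h0i : 0 ≤ i) (hij : i < j) (hjN : j ≤ (cs.length : Int))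
    (hlen : dp.length = cs.length + 1)
    (hread : ∀ e : Int, i ≤ e → e < j → dp.getD e.toNat 0 = pvW cs i.toNat e) :
    pvStepJ cs i dp j = dp.set j.toNat (pvW cs (i.toNat + 1) j) := by
  have hjlen : j.toNat < dp.length := by omega
  have hj0 : j ≠ 0 := by omega
  have hsd : PySem.List.pySetD dp j 0 = dp.set j.toNat 0 :=
    PySem.List.pySetD_of_nonneg _ _ (by omega)
  have ht3 : i = j - 1 ∨ i = j - 2 →
      (if 3 ≤ j ∧ pvIsValid (PySem.List.slice cs (some (j - 3)) (some j)) then pvW cs i.toNat (j - 3) else 0) = 0 := by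
    intro hc
    split
    · exact pvW_lt cs i.toNat (j - 3) (by omega)
    · rfl
  have ht2 : i = j - 1 →
      (if 2 ≤ j ∧ pvIsValid (PySem.List.slice cs (some (j - 2)) (some j)) then pvW cs i.toNat (j - 2) else 0) = 0 := by
    intro hc
    split
    · exact pvW_lt cs i.toNat (j - 2) (by omega)
    · rfl
  unfold pvStepJ
  rw [hsd]
  by_cases hc1 : i = j - 1
  · have hm : max i (j - 3) = j - 1 := by omega
    have hr : PySem.List.pyRange (j - 1) j 1 = [j - 1] := by
      rw [PySem.List.pyRange_one_cons (by omega), PySem.List.pyRange_one_eq_nil (by omega)]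
    rw [hm, hr]
    simp only [List.foldl_cons, List.foldl_nil]
    rw [pvStepE_set cs j (j - 1) 0 dp (by omega) (by omega) hjlen]
    congr 1
    rw [pvW_succ cs i.toNat j hj0, ht2 hc1, ht3 (Or.inl hc1),
        hread (j - 1) (by omega) (by omega)]
    have h1j : (1 : Int) ≤ j := by omega
    simp [h1j]
  · by_cases hc2 : i = j - 2
    · have hm : max i (j - 3) = j - 2 := by omega
      have hr : PySem.List.pyRange (j - 2) j 1 = [j - 2, j - 1] := by
        rw [PySem.List.pyRange_one_cons (by omega), PySem.List.pyRange_one_cons (by omega),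
            PySem.List.pyRange_one_eq_nil (by omega)]
        rw [show j - 2 + 1 = j - 1 from by omega]
      rw [hm, hr]
      simp only [List.foldl_cons, List.foldl_nil]
      rw [pvStepE_set cs j (j - 2) 0 dp (by omega) (by omega) hjlen,
          pvStepE_set cs j (j - 1) _ dp (by omega) (by omega) hjlen]
      congr 1
      rw [pvW_succ cs i.toNat j hj0, ht3 (Or.inr hc2),
          hread (j - 2) (by omega) (by omega), hread (j - 1) (by omega) (by omega)]
      have h1j : (1 : Int) ≤ j := by omega
      have h2j : (2 : Int) ≤ j := by omega
      simp only [h1j, h2j, true_and]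
      ring
    · have hle : i ≤ j - 3 := by omega
      have hm : max i (j - 3) = j - 3 := by omega
      have hr : PySem.List.pyRange (j - 3) j 1 = [j - 3, j - 2, j - 1] := by
        rw [PySem.List.pyRange_one_cons (by omega), PySem.List.pyRange_one_cons (by omega),
            PySem.List.pyRange_one_cons (by omega), PySem.List.pyRange_one_eq_nil (by omega)]
        rw [show j - 3 + 1 = j - 2 from by omega, show j - 2 + 1 = j - 1 from by omega]
      rw [hm, hr]
      simp only [List.foldl_cons, List.foldl_nil]
      rw [pvStepE_set cs j (j - 3) 0 dp (by omega) (by omega) hjlen,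
          pvStepE_set cs j (j - 2) _ dp (by omega) (by omega) hjlen,
          pvStepE_set cs j (j - 1) _ dp (by omega) (by omega) hjlen]
      congr 1
      rw [pvW_succ cs i.toNat j hj0,
          hread (j - 3) (by omega) (by omega), hread (j - 2) (by omega) (by omega),
          hread (j - 1) (by omega) (by omega)]
      have h1j : (1 : Int) ≤ j := by omega
      have h2j : (2 : Int) ≤ j := by omega
      have h3j : (3 : Int) ≤ j := by omega
      simp only [h1j, h2j, h3j, true_and]
      ring

-- invariant of the middle (j-descending) loop
def pvInv (cs : List Char) (i a : Nat) (dp : List Int) : Prop :=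
  dp.length = cs.length + 1 ∧
    ∀ e : Nat, e ≤ cs.length →
      dp.getD e 0 = if a < e then pvW cs (i + 1) (e : Int) else pvW cs (min i e) (e : Int)

theorem pvStepI_inner (cs : List Char) (i : Nat) :
    ∀ (c : Nat) (dp : List Int), i + c ≤ cs.length → pvInv cs i (i + c) dp →
      pvInv cs i i ((PySem.List.pyRange ((i : Int) + (c : Int)) (i : Int) (-1)).foldl (pvStepJ cs (i : Int)) dp) := by
  intro c
  induction c with
  | zero =>
    intro dp hle hInv
    rw [PySem.List.pyRange_neg_one_eq_nil (by omega)]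
    simpa using hInv
  | succ c ih =>
    intro dp hle hInv
    obtain ⟨hlen, hval⟩ := hInv
    have hb : (i : Int) < (i : Int) + ((c + 1 : Nat) : Int) := by push_cast; omega
    rw [PySem.List.pyRange_neg_one_cons hb]
    simp only [List.foldl_cons]
    have hread : ∀ e : Int, (i : Int) ≤ e → e < (i : Int) + ((c + 1 : Nat) : Int) →
        dp.getD e.toNat 0 = pvW cs ((i : Int)).toNat e := by
      intro e hie heb
      have hcast : ((e.toNat : Nat) : Int) = e := by omega
      have hv := hval e.toNat (by omega)
      rw [if_neg (by omega), show min i e.toNat = i from by omega] at hv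
      rw [hv, hcast, Int.toNat_natCast]
    have hstep := pvStepJ_eq cs (i : Int) ((i : Int) + ((c + 1 : Nat) : Int)) dp
      (by omega) hb (by push_cast; omega) hlen hread
    simp only [Int.toNat_natCast] at hstep
    rw [hstep]
    have harg : (i : Int) + ((c + 1 : Nat) : Int) - 1 = (i : Int) + (c : Int) := by push_cast; ring
    rw [harg]
    apply ih
    · omega
    · constructor
      · simpa using hlen
      · intro e he
        by_cases heq : e = ((i : Int) + ((c + 1 : Nat) : Int)).toNat
        · subst heq
          rw [pvGetD_set_self _ _ _ (by omega)]
          rw [if_pos (by omega)]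
          congr 1
        · rw [pvGetD_set_ne _ _ _ _ heq]
          have hv := hval e he
          by_cases hgt : i + c < e
          · rw [if_pos (by omega)] at hv ⊢
            exact hv
          · rw [if_neg (by omega)] at hv
            rw [if_neg (by omega)]
            exact hv

-- state after t completed outer iterations
def pvOut (cs : List Char) (t : Nat) (dp : List Int) : Prop :=
  dp.length = cs.length + 1 ∧
    ∀ e : Nat, e ≤ cs.length → dp.getD e 0 = pvW cs (min t e) (e : Int)

theorem pvOut_to_Inv (cs : List Char) (t : Nat) (dp : List Int)
    (h : pvOut cs t dp) : pvInv cs t (t + (cs.length - t)) dp := by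
  obtain ⟨hlen, hval⟩ := h
  refine ⟨hlen, ?_⟩
  intro e he
  rw [if_neg (by omega)]
  exact hval e he

theorem pvInv_to_Out (cs : List Char) (t : Nat) (dp : List Int)
    (h : pvInv cs t t dp) : pvOut cs (t + 1) dp := by
  obtain ⟨hlen, hval⟩ := h
  refine ⟨hlen, ?_⟩
  intro e he
  have hv := hval e he
  by_cases hgt : t < e
  · rw [if_pos hgt] at hv
    rw [hv]
    congr 1
    omega
  · rw [if_neg hgt] at hv
    rw [hv]
    congr 1
    omega

theorem pvOuter (cs : List Char) :
    ∀ (t : Nat) (dp0 : List Int), t ≤ cs.length → pvOut cs 0 dp0 →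
      pvOut cs t ((PySem.List.pyRange 0 (t : Int) 1).foldl (pvStepI cs (cs.length : Int)) dp0) := by
  intro t
  induction t with
  | zero =>
    intro dp0 _ h0
    rw [PySem.List.pyRange_one_eq_nil (by omega)]
    simpa using h0
  | succ t ih =>
    intro dp0 hle h0
    have hc : ((t + 1 : Nat) : Int) = (t : Int) + 1 := by push_cast; ring
    rw [hc, PySem.List.pyRange_one_succ_right (by omega), List.foldl_append]
    simp only [List.foldl_cons, List.foldl_nil]
    have hprev := ih dp0 (by omega) h0
    have harg : (cs.length : Int) = (t : Int) + ((cs.length - t : Nat) : Int) := by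
      push_cast [Nat.cast_sub (by omega : t ≤ cs.length)]; ring
    set D := (PySem.List.pyRange 0 (t : Int) 1).foldl (pvStepI cs (cs.length : Int)) dp0 with hD
    have h1 : pvInv cs t (t + (cs.length - t)) D := pvOut_to_Inv cs t D hprev
    have h2 := pvStepI_inner cs t (cs.length - t) D (by omega) h1
    rw [← harg] at h2
    exact pvInv_to_Out cs t _ h2

theorem pvInit (cs : List Char) :
    pvOut cs 0 ((List.replicate (cs.length + 1) (0 : Int)).set 0 1) := by
  constructor
  · simp
  · intro e he
    by_cases he0 : e = 0
    · subst he0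
      rw [pvGetD_set_self _ _ _ (by simp)]
      simp [pvW]
    · rw [pvGetD_set_ne _ _ _ _ he0]
      have : ((e : Int)) ≠ 0 := by omega
      simp [pvW, List.getD_eq_getElem?_getD, he, he0]

-- ===== VERDICT (by name: the statement is the Claim_ definition above) =====
theorem count_ip_addresses_spec : Claim_equal_count_ip_addresses := by
  unfold Claim_equal_count_ip_addresses
  intro S K _ _
  simp only [Spec_count_ip_addresses, count_ip_addresses, count_ip_addresses_alt,
    PySem.List.len_eq]
  by_cases h0 : (S.toList.length : Int) = 0
  · rw [if_pos h0, if_pos (Or.inl h0)]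
  · by_cases hK : (S.toList.length : Int) < K
    · rw [if_neg h0, if_pos hK, if_pos (Or.inr (Or.inr hK))]
    · rw [if_neg h0, if_neg hK]
      by_cases hKpos : K ≤ 0
      · rw [if_pos (Or.inr (Or.inl hKpos))]
        rw [PySem.List.pyRange_one_eq_nil (by omega)]
        simp only [List.foldl_nil]
        rw [PySem.List.pySetD_of_nonneg _ _ (le_refl (0 : Int))]
        rw [pvGetD_toNat _ _ (by omega)]
        rw [pvGetD_set_ne _ _ _ _ (by omega)]
        simp [List.getD_eq_getElem?_getD]
      · rw [if_neg (by omega)]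
        have hOKe : pvMemoOK S.toList PySem.Dict.empty := by
          intro p v h
          simp [PySem.Dict.get?_empty] at h
        rw [(pvFB_eq S.toList K.toNat ((S.toList.length : Int)) PySem.Dict.empty hOKe).1]
        have hout := pvOuter S.toList K.toNat
          ((List.replicate (S.toList.length + 1) (0 : Int)).set 0 1) (by omega) (pvInit S.toList)
        rw [PySem.List.pySetD_of_nonneg _ _ (le_refl (0 : Int))]
        simp only [Int.toNat_natCast, Int.toNat_zero]
        rw [show K = ((K.toNat : Nat) : Int) from by omega]
        simp only [Int.toNat_natCast]
        rw [pvGetD_toNat _ _ (by omega)]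
        simp only [Int.toNat_natCast]
        rw [hout.2 S.toList.length le_rfl,
          show min K.toNat S.toList.length = K.toNat from by omega]
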